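-- pv_equiv track=rewrite | github.com/Yueleng/ccc_cco_material | prev_exams_and_ans/2018ccc_s/q4_balanced_tree/balanced_trees.py | func
-- ===== SOURCE A (Python) =====
-- from collections import defaultdict
--
-- dp = defaultdict(int)
--
-- def func(n):
--     if n == 1 or n == 2:
--         return 1
--     if n in dp:
--         return dp[n]
--
--     fin = 0
--     k = n
--
--     while k >= 2:
--         # k: upper bound branches
--         # e.g.: n = 100, k = 100, x = 1, nn = 50, fin += (100 - 50) * func(1)
--         #  next n = 100, k = 50, x = 2, nn = 33, fin += (50 - 33) * func(2)
--         #  ...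
--         x = int(n / k)
--         # nn: lower bound branches
--         nn = int(n / (x + 1))
--         # func(2) = 1, k - nn = 1
--         fin += (k - nn) * func(x)
--         k = nn
--
--     dp[n] = fin
--     return fin
-- ===== SOURCE B (Python) =====
-- def func(n):
--     # Bottom-up: enumerate the distinct quotient values of n (closed under
--     # further division) and fill a table in ascending order; no recursion.
--     if n == 1 or n == 2:
--         return 1
--     if n < 1:
--         return 0
--     vals = []
--     k = 1
--     while k <= n:
--         v = n // k
--         vals.append(v)
--         k = n // v + 1
--     f = {1: 1, 2: 1}
--     for v in reversed(vals):
--         if v <= 2: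
--             continue
--         tot = 0
--         k = 2
--         while k <= v:
--             x = v // k
--             hi = v // x
--             tot += (hi - k + 1) * f[x]
--             k = hi + 1
--         f[v] = tot
--     return f[n]
-- ===== Notes on version B (the rewrite author's own statement) =====
-- stated objective: alternative
-- what changed: Replaces A's memoized top-down recursion with descending divisor blocks by an explicit bottom-up dynamic program: first enumerate the distinct quotient values n//k (a set closed under further division) in one ascending-block sweep, then fill a table over those values in increasing order, so no recursion and no memo-on-demand remains.
import Mathlib
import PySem

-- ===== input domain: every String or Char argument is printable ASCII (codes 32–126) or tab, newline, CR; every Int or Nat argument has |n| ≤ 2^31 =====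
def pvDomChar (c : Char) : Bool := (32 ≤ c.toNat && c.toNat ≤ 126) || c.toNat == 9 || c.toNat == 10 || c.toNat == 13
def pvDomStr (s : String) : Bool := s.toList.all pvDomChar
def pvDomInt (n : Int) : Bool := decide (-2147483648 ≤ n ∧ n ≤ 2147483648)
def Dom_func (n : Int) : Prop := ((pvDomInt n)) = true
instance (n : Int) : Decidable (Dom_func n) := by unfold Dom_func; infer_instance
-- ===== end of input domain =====

-- B replaces A's memoized top-down divisor-block recursion by an explicit bottom-up dynamic
-- program over the distinct quotient values (alternative algorithm, same asymptotic cost).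
-- A's module-level memo dict `dp` is modelled as state threaded from an empty dict (a fresh
-- interpreter); memoization never changes the returned value. A's `int(n / k)` (float
-- division, truncated) is ported as floor division: for the operands reached here
-- (0 < divisor, 0 ≤ n ≤ 2^31) the correctly rounded double of n/k truncates to n//k exactly.


-- ===== PORT A =====
-- A's recursion with the global memo `dp` threaded as state; fuel bounds the (finite)
-- recursion/loop depth and is never exhausted on the executed calls (proved below).
mutual
  def funcA (fuel : Nat) (dp : Std.HashMap Int Int) (n : Int) : Int × Std.HashMap Int Int :=
    match fuel with
    | 0 => (0, dp)
    | f + 1 =>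
      if n = 1 ∨ n = 2 then (1, dp)
      else
        match dp[n]? with                     -- `if n in dp: return dp[n]`
        | some v => (v, dp)
        | none =>
          let r := loopA f n n.toNat n 0 dp   -- fin = 0; k = n; while k >= 2: …
          (r.1, r.2.insert n r.1)             -- dp[n] = fin; return fin
  termination_by (fuel, 0)
  def loopA (f : Nat) (n : Int) (g : Nat) (k fin : Int) (dp : Std.HashMap Int Int) :
      Int × Std.HashMap Int Int :=
    match g with
    | 0 => (fin, dp)
    | g' + 1 =>
      if 2 ≤ k then
        let x := PySem.Int.floordiv n k        -- x = int(n / k)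
        let nn := PySem.Int.floordiv n (x + 1) -- nn = int(n / (x + 1))
        let r := funcA f dp x
        loopA f n g' nn (fin + (k - nn) * r.1) r.2
      else (fin, dp)
  termination_by (f, g + 1)
end

def func (n : Int) : Int := (funcA (n.toNat + 1) (∅ : Std.HashMap Int Int) n).1

-- ===== PORT B =====
-- `while k <= n: v = n // k; vals.append(v); k = n // v + 1`
def valsB (n : Int) : Nat → Int → List Int
  | 0, _ => []
  | g + 1, k =>
    if k ≤ n then
      let v := PySem.Int.floordiv n k
      v :: valsB n g (PySem.Int.floordiv n v + 1)
    else []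

-- `while k <= v: x = v // k; hi = v // x; tot += (hi - k + 1) * f[x]; k = hi + 1`
def innerB (v : Int) : Nat → Int → Int → Std.HashMap Int Int → Int
  | 0, _, tot, _ => tot
  | g + 1, k, tot, f =>
    if k ≤ v then
      let x := PySem.Int.floordiv v k
      let hi := PySem.Int.floordiv v x
      let w := match f[x]? with | some w => w | none => 0  -- f[x]; the key is always present (proved below)
      innerB v g (hi + 1) (tot + (hi - k + 1) * w) f
    else tot

-- `for v in reversed(vals): if v <= 2: continue; … ; f[v] = tot`
def fillB : List Int → Std.HashMap Int Int → Std.HashMap Int Int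
  | [], f => f
  | v :: vs, f => fillB vs (if v ≤ 2 then f else f.insert v (innerB v v.toNat 2 0 f))

def func_alt (n : Int) : Int :=
  if n = 1 ∨ n = 2 then 1
  else if n < 1 then 0
  else
    let vals := valsB n n.toNat 1
    let f := fillB vals.reverse (((∅ : Std.HashMap Int Int).insert 1 1).insert 2 1)
    match f[n]? with | some w => w | none => 0  -- f[n]; n is always present (proved below)

-- ===== PRECONDITION & SPEC =====
def Spec_func (n : Int) (out : Int) : Prop := out = func_alt n
instance (n : Int) (out : Int) : Decidable (Spec_func n out) := by unfold Spec_func; infer_instance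

-- ===== CLAIM (what is proved, stated in full; the proofs are below) =====
def Claim_equal_func : Prop := ∀ (n : Int), Dom_func n → Spec_func n (func n)

-- ===== LEMMAS AND PROOFS =====

-- The common mathematical value: G n = 1 for n ∈ {1,2}, else Σ_{j=2..n} G (n / j) (Nat division).
def G (n : Nat) : Int :=
  if n = 1 ∨ n = 2 then 1
  else ∑ j ∈ (Finset.Ioc 1 n).attach, G (n / j.1)
decreasing_by
  · have hj := j.2
    simp only [Finset.mem_Ioc] at hj
    exact Nat.div_lt_self (by omega) hj.1

theorem G_eq (n : Nat) :
    G n = if n = 1 ∨ n = 2 then 1 else ∑ j ∈ Finset.Ioc 1 n, G (n / j) := by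
  rw [G]
  split_ifs with h
  · rfl
  · rw [← Finset.sum_attach (Finset.Ioc 1 n) (fun j => G (n / j))]

theorem G_one : G 1 = 1 := by rw [G_eq]; simp
theorem G_two : G 2 = 1 := by rw [G_eq]; simp
theorem G_zero : G 0 = 0 := by rw [G_eq]; simp

def S (N K : Nat) : Int := ∑ j ∈ Finset.Ioc 1 K, G (N / j)

theorem fd_cast (a b : Int) (ha : 0 ≤ a) (hb : 0 < b) :
    PySem.Int.floordiv a b = ((a.toNat / b.toNat : Nat) : Int) := by
  rw [← Int.toNat_of_nonneg ha, ← Int.toNat_of_nonneg hb.le, PySem.Int.floordiv_natCast]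
  simp

-- quotient-block facts (Nat)
theorem quot_le_quot {n j k : Nat} (hj : 0 < j) (hjk : j ≤ k) : n / k ≤ n / j :=
  Nat.div_le_div_left hjk hj

theorem blockA {n j k : Nat} (hjk : j ≤ k) (hlow : n / (n / k + 1) < j) : n / j = n / k := by
  have hj : 0 < j := lt_of_le_of_lt (Nat.zero_le _) hlow
  refine le_antisymm ?_ (quot_le_quot hj hjk)
  by_contra hlt
  have h1 : n / k + 1 ≤ n / j := Nat.lt_of_not_le hlt
  have h2 : (n / k + 1) * j ≤ n := (Nat.le_div_iff_mul_le hj).mp h1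
  have h3 : j ≤ n / (n / k + 1) :=
    (Nat.le_div_iff_mul_le (Nat.succ_pos _)).mpr (by rw [Nat.mul_comm]; exact h2)
  exact absurd h3 (Nat.not_le.mpr hlow)

theorem blockB {v j k : Nat} (hk : 0 < k) (hkj : k ≤ j) (hj : j ≤ v / (v / k)) :
    v / j = v / k := by
  have hj0 : 0 < j := lt_of_lt_of_le hk hkj
  refine le_antisymm (quot_le_quot hk hkj) ?_
  have hvk : 0 < v / k := by
    rcases Nat.eq_zero_or_pos (v / k) with h | h
    · rw [h, Nat.div_zero] at hj
      omega
    · exact h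
  have h2 : j * (v / k) ≤ v := (Nat.le_div_iff_mul_le hvk).mp hj
  exact (Nat.le_div_iff_mul_le hj0).mpr (by rw [Nat.mul_comm]; exact h2)

theorem nnA_lt {n k : Nat} (h2 : 2 ≤ k) (hk : k ≤ n) : n / (n / k + 1) < k := by
  by_contra h
  have h1 : k ≤ n / (n / k + 1) := Nat.le_of_not_lt h
  have h3 : k * (n / k + 1) ≤ n := (Nat.le_div_iff_mul_le (Nat.succ_pos _)).mp h1
  have h4 : (n / k + 1) * k ≤ n := by rw [Nat.mul_comm]; exact h3
  have hk0 : 0 < k := by omega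
  have h5 : n / k + 1 ≤ n / k := (Nat.le_div_iff_mul_le hk0).mpr h4
  exact Nat.not_succ_le_self _ h5

theorem nnA_pos {n k : Nat} (h2 : 2 ≤ k) (hk : k ≤ n) : 1 ≤ n / (n / k + 1) := by
  have h3 : n / k < n := Nat.div_lt_self (by omega) (by omega)
  exact (Nat.le_div_iff_mul_le (Nat.succ_pos _)).mpr (by rw [Nat.one_mul]; exact h3)

theorem hiB_ge {v k : Nat} (h2 : 1 ≤ k) (hk : k ≤ v) : k ≤ v / (v / k) := by
  have hvk : 0 < v / k := Nat.div_pos hk (by omega)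
  exact (Nat.le_div_iff_mul_le hvk).mpr (by rw [Nat.mul_comm]; exact Nat.div_mul_le_self v k)

theorem hiB_le {v k : Nat} (h1 : 1 ≤ k) (hk : k ≤ v) : v / (v / k) ≤ v :=
  Nat.div_le_self _ _

-- S splits along A's descending block
theorem S_stepA {N K : Nat} (h2 : 2 ≤ K) (hK : K ≤ N) :
    S N K = S N (N / (N / K + 1)) + ((K - N / (N / K + 1) : Nat) : Int) * G (N / K) := by
  have hlt := nnA_lt h2 hK
  have hpos := nnA_pos h2 hK
  have hsplit := Finset.sum_Ioc_consecutive (fun j => G (N / j)) hpos (le_of_lt hlt)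
  unfold S
  rw [← hsplit]
  congr 1
  rw [Finset.sum_congr rfl (fun j hj => by
    simp only [Finset.mem_Ioc] at hj
    exact congrArg G (blockA hj.2 hj.1))]
  rw [Finset.sum_const, Nat.card_Ioc, nsmul_eq_mul]

-- the ascending tail sum splits along B's ascending block
theorem S_stepB {V K : Nat} (h2 : 2 ≤ K) (hK : K ≤ V) :
    (∑ j ∈ Finset.Ioc (K - 1) V, G (V / j)) =
      ((V / (V / K) + 1 - K : Nat) : Int) * G (V / K) +
        ∑ j ∈ Finset.Ioc (V / (V / K)) V, G (V / j) := by
  have hge := hiB_ge (by omega : 1 ≤ K) hK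
  have hle := hiB_le (by omega) hK
  have hsplit := Finset.sum_Ioc_consecutive (fun j => G (V / j)) (show K - 1 ≤ V / (V / K) by omega) hle
  rw [← hsplit]
  congr 1
  rw [Finset.sum_congr rfl (fun j hj => by
    simp only [Finset.mem_Ioc] at hj
    exact congrArg G (blockB (by omega) (by omega) hj.2))]
  rw [Finset.sum_const, Nat.card_Ioc, nsmul_eq_mul]
  congr 2
  omega

-- memo/table soundness: every stored value is the G-value of its key
def InvT (dp : Std.HashMap Int Int) : Prop := ∀ (m w : Int), dp[m]? = some w → w = G m.toNat

theorem S_bot {N K : Nat} (h : K ≤ 1) : S N K = 0 := by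
  unfold S
  rw [Finset.Ioc_eq_empty (by omega), Finset.sum_empty]

theorem loopA_correct (f : Nat)
    (IH : ∀ dp (x : Int), InvT dp → x.toNat < f →
      (funcA f dp x).1 = G x.toNat ∧ InvT (funcA f dp x).2) :
    ∀ g (n k fin : Int) dp, InvT dp → 3 ≤ n → 1 ≤ k → k ≤ n → k.toNat ≤ g → n.toNat ≤ f →
      (loopA f n g k fin dp).1 = fin + S n.toNat k.toNat ∧ InvT (loopA f n g k fin dp).2 := by
  intro g
  induction g with
  | zero =>
    intro n k fin dp hdp h3 hk1 hkn hg hf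
    omega
  | succ g ihg =>
    intro n k fin dp hdp h3 hk1 hkn hg hf
    rw [loopA]
    by_cases hk2 : 2 ≤ k
    · simp only [if_pos hk2]
      have hn0 : (0:Int) ≤ n := by omega
      have hk0 : (0:Int) < k := by omega
      have hK2 : 2 ≤ k.toNat := by omega
      have hKN : k.toNat ≤ n.toNat := by omega
      have hN3 : 3 ≤ n.toNat := by omega
      have hx : PySem.Int.floordiv n k = ((n.toNat / k.toNat : Nat) : Int) := fd_cast n k hn0 hk0
      have hxnn : PySem.Int.floordiv n (((n.toNat / k.toNat : Nat) : Int) + 1)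
          = ((n.toNat / (n.toNat / k.toNat + 1) : Nat) : Int) := by
        have h0 := fd_cast n (((n.toNat / k.toNat : Nat) : Int) + 1) hn0 (by positivity)
        rw [h0]
        have h1 : ((((n.toNat / k.toNat : Nat) : Int) + 1)).toNat = n.toNat / k.toNat + 1 := by
          rw [show (((n.toNat / k.toNat : Nat) : Int) + 1) = ((n.toNat / k.toNat + 1 : Nat) : Int) by
            push_cast; ring, Int.toNat_natCast]
        rw [h1]
      simp only [hx, hxnn]
      have hxf : (((n.toNat / k.toNat : Nat) : Int)).toNat < f := by
        have : n.toNat / k.toNat < n.toNat := Nat.div_lt_self (by omega) (by omega)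
        simp only [Int.toNat_natCast]
        omega
      obtain ⟨hr1, hr2⟩ := IH dp _ hdp hxf
      have hnnK := nnA_lt hK2 hKN
      have hnn1 := nnA_pos hK2 hKN
      have hnnN : n.toNat / (n.toNat / k.toNat + 1) ≤ n.toNat := Nat.div_le_self _ _
      obtain ⟨hl1, hl2⟩ := ihg n (((n.toNat / (n.toNat / k.toNat + 1) : Nat) : Int)) _ _ hr2
        h3 (by exact_mod_cast hnn1)
        (by rw [← Int.toNat_of_nonneg hn0]; exact_mod_cast hnnN)
        (by simp only [Int.toNat_natCast]; omega) hf
      refine ⟨?_, hl2⟩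
      rw [hl1, hr1]
      simp only [Int.toNat_natCast]
      rw [S_stepA hK2 hKN]
      have hc : ((k.toNat - n.toNat / (n.toNat / k.toNat + 1) : Nat) : Int)
          = k - ((n.toNat / (n.toNat / k.toNat + 1) : Nat) : Int) := by
        push_cast [Nat.cast_sub (by omega : n.toNat / (n.toNat / k.toNat + 1) ≤ k.toNat)]
        omega
      rw [hc]
      ring
    · simp only [if_neg hk2]
      exact ⟨by rw [S_bot (by omega : k.toNat ≤ 1)]; ring, hdp⟩

theorem funcA_correct : ∀ f dp (n : Int), InvT dp → n.toNat < f →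
    (funcA f dp n).1 = G n.toNat ∧ InvT (funcA f dp n).2 := by
  intro f
  induction f with
  | zero => intro dp n _ h; omega
  | succ f ihf =>
    intro dp n hdp hn
    rw [funcA]
    by_cases hb : n = 1 ∨ n = 2
    · simp only [if_pos hb]
      refine ⟨?_, hdp⟩
      rcases hb with h | h <;> subst h <;> simp [G_one, G_two]
    · simp only [if_neg hb]
      cases hfind : dp[n]? with
      | some v =>
        exact ⟨hdp n v hfind, hdp⟩
      | none =>
        by_cases h3 : 3 ≤ n
        · obtain ⟨hl1, hl2⟩ := loopA_correct f ihf n.toNat n n 0 dp hdp h3 (by omega)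
            le_rfl le_rfl (by omega)
          constructor
          · show (loopA f n n.toNat n 0 dp).1 = G n.toNat
            rw [hl1, G_eq]
            have : ¬ (n.toNat = 1 ∨ n.toNat = 2) := by omega
            rw [if_neg this]
            unfold S
            ring
          · show InvT ((loopA f n n.toNat n 0 dp).2.insert n (loopA f n n.toNat n 0 dp).1)
            intro m w hmw
            rw [Std.HashMap.getElem?_insert] at hmw
            by_cases hmn : n == m
            · rw [if_pos hmn] at hmw
              have hmn' : n = m := by simpa using hmn
              have hw : w = (loopA f n n.toNat n 0 dp).1 :=
                ((Option.some.injEq _ _).mp hmw).symm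
              rw [hw, ← hmn', hl1, G_eq]
              have : ¬ (n.toNat = 1 ∨ n.toNat = 2) := by omega
              rw [if_neg this]
              unfold S
              ring
            · rw [if_neg hmn] at hmw
              exact hl2 m w hmw
        · -- n ≤ 0: the while loop is never entered (k = n < 2) and 0 is memoized
          have hn0 : n.toNat = 0 := by omega
          have hL : loopA f n 0 n 0 dp = (0, dp) := by rw [loopA]
          constructor
          · show (loopA f n n.toNat n 0 dp).1 = G n.toNat
            rw [hn0, hL, G_zero]
          · show InvT ((loopA f n n.toNat n 0 dp).2.insert n (loopA f n n.toNat n 0 dp).1)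
            rw [hn0, hL]
            intro m w hmw
            rw [Std.HashMap.getElem?_insert] at hmw
            by_cases hmn : n == m
            · rw [if_pos hmn] at hmw
              have hmn' : n = m := by simpa using hmn
              have hw : w = 0 := ((Option.some.injEq _ _).mp hmw).symm
              rw [hw, ← hmn', hn0, G_zero]
            · rw [if_neg hmn] at hmw
              exact hdp m w hmw

theorem func_eq_G (n : Int) : func n = G n.toNat := by
  have h := funcA_correct (n.toNat + 1) ∅ n (by unfold InvT; intro m w hw; simp at hw) (by omega)
  exact h.1


-- ===== B-side lemmas =====

theorem descB {N K : Nat} (h1 : 1 ≤ K) (hK : K ≤ N) : N / (N / (N / K) + 1) < N / K := by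
  have hx : 1 ≤ N / K := Nat.div_pos hK (by omega)
  rcases Nat.lt_or_ge (N / K) 2 with h | h
  · have hx1 : N / K = 1 := by omega
    rw [hx1, Nat.div_one]
    have h0 : N / (N + 1) = 0 := Nat.div_eq_of_lt (by omega)
    rw [h0]
    omega
  · exact nnA_lt h (Nat.div_le_self _ _)

theorem valsB_sound (n : Int) (hn : 1 ≤ n) :
    ∀ g (k : Int), 1 ≤ k → ∀ v ∈ valsB n g k,
      ∃ j : Nat, k.toNat ≤ j ∧ j ≤ n.toNat ∧ v = ((n.toNat / j : Nat) : Int) := by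
  intro g
  induction g with
  | zero => intro k hk v hv; simp [valsB] at hv
  | succ g ih =>
    intro k hk v hv
    rw [valsB] at hv
    by_cases hkn : k ≤ n
    · have hKN : k.toNat ≤ n.toNat := by omega
      have hK1 : 1 ≤ k.toNat := by omega
      have hx := fd_cast n k (by omega) (by omega)
      have hq : 1 ≤ n.toNat / k.toNat := Nat.div_pos hKN (by omega)
      have hnext := fd_cast n ((n.toNat / k.toNat : Nat) : Int) (by omega) (by exact_mod_cast hq)
      simp only [if_pos hkn, hx, hnext, Int.toNat_natCast] at hv
      rcases List.mem_cons.mp hv with rfl | hv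
      · exact ⟨k.toNat, le_refl _, hKN, rfl⟩
      · obtain ⟨j, hj1, hj2, hj3⟩ := ih (((n.toNat / (n.toNat / k.toNat) : Nat) : Int) + 1)
          (by have := Int.natCast_nonneg (n.toNat / (n.toNat / k.toNat)); omega) v hv
        refine ⟨j, ?_, hj2, hj3⟩
        have hge := hiB_ge hK1 hKN
        have htn : (((n.toNat / (n.toNat / k.toNat) : Nat) : Int) + 1).toNat
            = n.toNat / (n.toNat / k.toNat) + 1 := by
          rw [show (((n.toNat / (n.toNat / k.toNat) : Nat) : Int) + 1)
              = ((n.toNat / (n.toNat / k.toNat) + 1 : Nat) : Int) by push_cast; ring,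
            Int.toNat_natCast]
        rw [htn] at hj1
        omega
    · simp only [if_neg hkn] at hv
      simp at hv

theorem valsB_sorted (n : Int) (hn : 1 ≤ n) :
    ∀ g (k : Int), 1 ≤ k → List.Pairwise (· > ·) (valsB n g k) := by
  intro g
  induction g with
  | zero => intro k hk; simp [valsB]
  | succ g ih =>
    intro k hk
    rw [valsB]
    by_cases hkn : k ≤ n
    · have hKN : k.toNat ≤ n.toNat := by omega
      have hK1 : 1 ≤ k.toNat := by omega
      have hx := fd_cast n k (by omega) (by omega)
      have hq : 1 ≤ n.toNat / k.toNat := Nat.div_pos hKN (by omega)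
      have hnext := fd_cast n ((n.toNat / k.toNat : Nat) : Int) (by omega) (by exact_mod_cast hq)
      simp only [if_pos hkn, hx, hnext, Int.toNat_natCast]
      have hpos : (1:Int) ≤ ((n.toNat / (n.toNat / k.toNat) : Nat) : Int) + 1 := by
        have := Int.natCast_nonneg (n.toNat / (n.toNat / k.toNat)); omega
      refine List.pairwise_cons.mpr ⟨?_, ih _ hpos⟩
      intro b hb
      obtain ⟨j, hj1, hj2, hj3⟩ := valsB_sound n hn g _ hpos b hb
      have hjlow : n.toNat / (n.toNat / k.toNat) + 1 ≤ j := by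
        have htn : (((n.toNat / (n.toNat / k.toNat) : Nat) : Int) + 1).toNat
            = n.toNat / (n.toNat / k.toNat) + 1 := by
          rw [show (((n.toNat / (n.toNat / k.toNat) : Nat) : Int) + 1)
              = ((n.toNat / (n.toNat / k.toNat) + 1 : Nat) : Int) by push_cast; ring,
            Int.toNat_natCast]
        rw [htn] at hj1
        exact hj1
      have hmono : n.toNat / j ≤ n.toNat / (n.toNat / (n.toNat / k.toNat) + 1) :=
        quot_le_quot (by omega) hjlow
      have hdesc := descB hK1 hKN
      rw [hj3]
      have : n.toNat / j < n.toNat / k.toNat := by omega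
      exact_mod_cast this
    · simp [if_neg hkn]

theorem valsB_complete (n : Int) (hn : 1 ≤ n) :
    ∀ g (k : Int), 1 ≤ k → ∀ j : Nat, k.toNat ≤ j → j ≤ n.toNat → n.toNat + 1 ≤ g + k.toNat →
      ((n.toNat / j : Nat) : Int) ∈ valsB n g k := by
  intro g
  induction g with
  | zero => intro k hk j hj1 hj2 hfuel; omega
  | succ g ih =>
    intro k hk j hj1 hj2 hfuel
    have hKN : k.toNat ≤ n.toNat := le_trans hj1 hj2
    have hkn : k ≤ n := by omega
    have hK1 : 1 ≤ k.toNat := by omega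
    rw [valsB]
    have hx := fd_cast n k (by omega) (by omega)
    have hq : 1 ≤ n.toNat / k.toNat := Nat.div_pos hKN (by omega)
    have hnext := fd_cast n ((n.toNat / k.toNat : Nat) : Int) (by omega) (by exact_mod_cast hq)
    simp only [if_pos hkn, hx, hnext, Int.toNat_natCast]
    by_cases hcase : j ≤ n.toNat / (n.toNat / k.toNat)
    · have hbl : n.toNat / j = n.toNat / k.toNat := blockB (by omega) hj1 hcase
      rw [hbl]
      exact List.mem_cons_self
    · have htn : (((n.toNat / (n.toNat / k.toNat) : Nat) : Int) + 1).toNat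
          = n.toNat / (n.toNat / k.toNat) + 1 := by
        rw [show (((n.toNat / (n.toNat / k.toNat) : Nat) : Int) + 1)
            = ((n.toNat / (n.toNat / k.toNat) + 1 : Nat) : Int) by push_cast; ring,
          Int.toNat_natCast]
      have hge := hiB_ge hK1 hKN
      refine List.mem_cons_of_mem _ (ih _
        (by have := Int.natCast_nonneg (n.toNat / (n.toNat / k.toNat)); omega) j
        (by rw [htn]; omega) hj2 (by rw [htn]; omega))

theorem innerB_correct (v : Int) (h3 : 3 ≤ v) (f : Std.HashMap Int Int) (hsound : InvT f)
    (hkeys : ∀ K : Nat, 2 ≤ K → K ≤ v.toNat → (f[((v.toNat / K : Nat) : Int)]?).isSome) :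
    ∀ g (k tot : Int), 2 ≤ k → v.toNat + 1 ≤ g + k.toNat →
      innerB v g k tot f = tot + ∑ j ∈ Finset.Ioc (k.toNat - 1) v.toNat, G (v.toNat / j) := by
  intro g
  induction g with
  | zero =>
    intro k tot hk hfuel
    rw [innerB, Finset.Ioc_eq_empty (by omega), Finset.sum_empty]
    ring
  | succ g ih =>
    intro k tot hk hfuel
    rw [innerB]
    by_cases hkv : k ≤ v
    · have hKV : k.toNat ≤ v.toNat := by omega
      have hK2 : 2 ≤ k.toNat := by omega
      have hx := fd_cast v k (by omega) (by omega)
      have hq : 1 ≤ v.toNat / k.toNat := Nat.div_pos hKV (by omega)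
      have hhi := fd_cast v ((v.toNat / k.toNat : Nat) : Int) (by omega) (by exact_mod_cast hq)
      have hkey := hkeys k.toNat hK2 hKV
      obtain ⟨w, hw⟩ := Option.isSome_iff_exists.mp hkey
      have hwv : w = G (v.toNat / k.toNat) := by
        have h := hsound _ _ hw
        rwa [Int.toNat_natCast] at h
      simp only [if_pos hkv, hx, hhi, Int.toNat_natCast, hw]
      have hge := hiB_ge (by omega : 1 ≤ k.toNat) hKV
      have hle := hiB_le (by omega : 1 ≤ k.toNat) hKV
      have htn : (((v.toNat / (v.toNat / k.toNat) : Nat) : Int) + 1).toNat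
          = v.toNat / (v.toNat / k.toNat) + 1 := by
        rw [show (((v.toNat / (v.toNat / k.toNat) : Nat) : Int) + 1)
            = ((v.toNat / (v.toNat / k.toNat) + 1 : Nat) : Int) by push_cast; ring,
          Int.toNat_natCast]
      rw [ih _ _ (by have := Int.natCast_nonneg (v.toNat / (v.toNat / k.toNat)); omega)
        (by rw [htn]; omega)]
      rw [htn, Nat.add_sub_cancel]
      have hsum := S_stepB hK2 hKV
      have hkK : k = ((k.toNat : Nat) : Int) := (Int.toNat_of_nonneg (by omega)).symm
      have hcast : ((v.toNat / (v.toNat / k.toNat) + 1 - k.toNat : Nat) : Int)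
          = ((v.toNat / (v.toNat / k.toNat) : Nat) : Int) - ((k.toNat : Nat) : Int) + 1 := by
        rw [Nat.cast_sub (by omega : k.toNat ≤ v.toNat / (v.toNat / k.toNat) + 1)]
        push_cast
        ring
      rw [hwv, hkK]
      simp only [Int.toNat_natCast]
      rw [hsum, hcast]
      ring
    · rw [if_neg hkv, Finset.Ioc_eq_empty (by omega), Finset.sum_empty]
      ring


theorem asc_mem (n : Int) (hn : 3 ≤ n) (x : Int) :
    x ∈ (valsB n n.toNat 1).reverse ↔
      ∃ j : Nat, 1 ≤ j ∧ j ≤ n.toNat ∧ x = ((n.toNat / j : Nat) : Int) := by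
  rw [List.mem_reverse]
  constructor
  · intro h
    obtain ⟨j, h1, h2, h3⟩ := valsB_sound n (by omega) n.toNat 1 (by omega) x h
    exact ⟨j, by simpa using h1, h2, h3⟩
  · rintro ⟨j, h1, h2, rfl⟩
    exact valsB_complete n (by omega) n.toNat 1 (by omega) j (by simpa) h2 (by simp)

theorem asc_sorted (n : Int) (hn : 3 ≤ n) :
    ((valsB n n.toNat 1).reverse).Pairwise (· < ·) := by
  rw [List.pairwise_reverse]
  exact valsB_sorted n (by omega) n.toNat 1 (by omega)

theorem fillB_go (n : Int) (hn : 3 ≤ n) :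
    ∀ (l pre : List Int) (f : Std.HashMap Int Int),
      pre ++ l = (valsB n n.toNat 1).reverse →
      InvT f →
      (∀ x : Int, 1 ≤ x → x ≤ 2 → (f[x]?).isSome) →
      (∀ x ∈ pre, (f[x]?).isSome) →
      InvT (fillB l f) ∧ (∀ x ∈ pre ++ l, ((fillB l f)[x]?).isSome) := by
  intro l
  induction l with
  | nil =>
    intro pre f hsplit hsound h12 hpre
    rw [fillB]
    exact ⟨hsound, by simpa using hpre⟩
  | cons v vs ih =>
    intro pre f hsplit hsound h12 hpre
    have hvasc : v ∈ (valsB n n.toNat 1).reverse := by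
      rw [← hsplit]
      exact List.mem_append.mpr (Or.inr List.mem_cons_self)
    obtain ⟨jv, hjv1, hjv2, hjv3⟩ := (asc_mem n hn v).mp hvasc
    have hv1 : 1 ≤ v := by
      rw [hjv3]
      exact_mod_cast Nat.div_pos hjv2 (by omega)
    have hsplit' : (pre ++ [v]) ++ vs = (valsB n n.toNat 1).reverse := by
      rw [List.append_assoc]
      simpa using hsplit
    rw [fillB]
    by_cases hv2 : v ≤ 2
    · rw [if_pos hv2]
      obtain ⟨hs, hm⟩ := ih (pre ++ [v]) f hsplit' hsound h12 (by
        intro x hx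
        rcases List.mem_append.mp hx with hx | hx
        · exact hpre x hx
        · have hxv : x = v := by simpa using hx
          exact hxv ▸ h12 v hv1 hv2)
      refine ⟨hs, ?_⟩
      intro x hx
      apply hm
      rw [List.append_assoc]
      simpa using hx
    · rw [if_neg hv2]
      have hv3 : 3 ≤ v := by omega
      have hV3 : 3 ≤ v.toNat := by omega
      have hsortedP : (pre ++ v :: vs).Pairwise (· < ·) := hsplit ▸ asc_sorted n hn
      have hvlt : ∀ y ∈ vs, v < y := by
        have h1 := (List.pairwise_append.mp hsortedP).2.1
        exact (List.pairwise_cons.mp h1).1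
      have hkeys : ∀ K : Nat, 2 ≤ K → K ≤ v.toNat → (f[((v.toNat / K : Nat) : Int)]?).isSome := by
        intro K hK2 hKV
        rcases Nat.lt_or_ge (v.toNat / K) 3 with hle2 | hgt2
        · exact h12 _ (by exact_mod_cast Nat.div_pos hKV (by omega)) (by exact_mod_cast Nat.lt_succ_iff.mp hle2)
        · -- x = v // K is itself a quotient value of n, strictly below v: it is in pre
          have hVN : v.toNat = n.toNat / jv := by rw [hjv3, Int.toNat_natCast]
          have hjKle : jv * K ≤ n.toNat := by
            by_contra hgt
            have : v.toNat / K = 0 := by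
              rw [hVN, Nat.div_div_eq_div_mul]
              exact Nat.div_eq_of_lt (by omega)
            omega
          have hxasc : ((v.toNat / K : Nat) : Int) ∈ (valsB n n.toNat 1).reverse := by
            rw [asc_mem n hn]
            exact ⟨jv * K, Nat.mul_pos (by omega) (by omega), hjKle, by rw [hVN, Nat.div_div_eq_div_mul]⟩
          have hxlt : ((v.toNat / K : Nat) : Int) < v := by
            have h1 : v.toNat / K < v.toNat := Nat.div_lt_self (by omega) (by omega)
            have h2 : v = ((v.toNat : Nat) : Int) := (Int.toNat_of_nonneg (by omega)).symm
            rw [h2]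
            exact_mod_cast h1
          rw [← hsplit] at hxasc
          rcases List.mem_append.mp hxasc with hx | hx
          · exact hpre _ hx
          · rcases List.mem_cons.mp hx with hx | hx
            · omega
            · exact absurd (hvlt _ hx) (by omega)
      have hIB : innerB v v.toNat 2 0 f = G v.toNat := by
        have h := innerB_correct v hv3 f hsound hkeys v.toNat 2 0 (by omega) (by norm_num)
        rw [h, show ((2:Int).toNat - 1) = 1 from rfl]
        rw [G_eq, if_neg (by omega : ¬ (v.toNat = 1 ∨ v.toNat = 2))]
        ring
      have hsound' : InvT (f.insert v (innerB v v.toNat 2 0 f)) := by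
        intro m w hmw
        rw [Std.HashMap.getElem?_insert] at hmw
        by_cases hvm : v == m
        · rw [if_pos hvm] at hmw
          have hvm' : v = m := by simpa using hvm
          have hw : w = innerB v v.toNat 2 0 f := ((Option.some.injEq _ _).mp hmw).symm
          rw [hw, hIB, hvm']
        · rw [if_neg hvm] at hmw
          exact hsound m w hmw
      obtain ⟨hs, hm⟩ := ih (pre ++ [v]) _ hsplit' hsound' (by
        intro x hx1 hx2
        rw [Std.HashMap.getElem?_insert]
        by_cases hvx : v == x
        · rw [if_pos hvx]; rfl
        · rw [if_neg hvx]; exact h12 x hx1 hx2)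
        (by
        intro x hx
        rw [Std.HashMap.getElem?_insert]
        by_cases hvx : v == x
        · rw [if_pos hvx]; rfl
        · rw [if_neg hvx]
          rcases List.mem_append.mp hx with hx | hx
          · exact hpre x hx
          · have : x = v := by simpa using hx
            exact absurd (this ▸ hvx) (by simp))
      refine ⟨hs, ?_⟩
      intro x hx
      apply hm
      rw [List.append_assoc]
      simpa using hx

theorem funcAlt_eq_G (n : Int) : func_alt n = G n.toNat := by
  rw [func_alt]
  by_cases hb : n = 1 ∨ n = 2
  · rw [if_pos hb]
    rcases hb with h | h <;> subst h <;> simp [G_one, G_two]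
  · rw [if_neg hb]
    by_cases hlt : n < 1
    · rw [if_pos hlt]
      rw [show n.toNat = 0 by omega, G_zero]
    · rw [if_neg hlt]
      have hn3 : 3 ≤ n := by omega
      have hInv : InvT (((∅ : Std.HashMap Int Int).insert 1 1).insert 2 1) := by
        intro m w hmw
        rw [Std.HashMap.getElem?_insert] at hmw
        by_cases h2m : (2:Int) == m
        · rw [if_pos h2m] at hmw
          have : (2:Int) = m := by simpa using h2m
          have hw : w = 1 := ((Option.some.injEq _ _).mp hmw).symm
          rw [hw, ← this]
          exact G_two.symm
        · rw [if_neg h2m] at hmw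
          rw [Std.HashMap.getElem?_insert] at hmw
          by_cases h1m : (1:Int) == m
          · rw [if_pos h1m] at hmw
            have : (1:Int) = m := by simpa using h1m
            have hw : w = 1 := ((Option.some.injEq _ _).mp hmw).symm
            rw [hw, ← this]
            exact G_one.symm
          · rw [if_neg h1m] at hmw
            simp at hmw
      have h12 : ∀ x : Int, 1 ≤ x → x ≤ 2 →
          (((((∅ : Std.HashMap Int Int).insert 1 1).insert 2 1))[x]?).isSome := by
        intro x hx1 hx2
        have : x = 1 ∨ x = 2 := by omega
        rcases this with h | h <;> subst h <;> simp
      obtain ⟨hs, hm⟩ := fillB_go n hn3 ((valsB n n.toNat 1).reverse) []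
        (((∅ : Std.HashMap Int Int).insert 1 1).insert 2 1) rfl hInv h12 (by simp)
      have hnasc : n ∈ (valsB n n.toNat 1).reverse := by
        rw [asc_mem n hn3]
        exact ⟨1, le_rfl, by omega, by rw [Nat.div_one, Int.toNat_of_nonneg (by omega)]⟩
      have hsome := hm n (by simpa using hnasc)
      obtain ⟨w, hw⟩ := Option.isSome_iff_exists.mp hsome
      show (match (fillB (valsB n n.toNat 1).reverse
          (((∅ : Std.HashMap Int Int).insert 1 1).insert 2 1))[n]? with
        | some w => w | none => 0) = G n.toNat
      rw [hw]
      exact hs n w hw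

-- ===== VERDICT (by name: the statement is the Claim_ definition above) =====
theorem func_spec : Claim_equal_func := by
  intro n _
  unfold Spec_func
  rw [func_eq_G, funcAlt_eq_G]
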